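-- pv_equiv track=rewrite | github.com/liaochris/oss_hierarchy | source/derived/org_characteristics/org_panel.py | CreateColumnsDict
-- ===== SOURCE A (Python) =====
-- def CreateColumnsDict(col_dicts):
--     columns_dict = {k: sorted(set(col for sub in v for col in sub))
--                 for k, v in {k: [] for k in ["df_outcomes","df_knowledge_redundancy","df_knowledge_redundancy_imp",
--                     "df_routines","df_talent_investment","df_talent_investment_imp","df_filtered_important"]}.items()}
--     for d in col_dicts:
--         for k, v in d.items():
--             columns_dict[k].append(v)
--     for k, v in columns_dict.items():
--         columns_dict[k] = sorted(set(col for sub in v for col in sub))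
--     return columns_dict
-- ===== SOURCE B (Python) =====
-- def CreateColumnsDict(col_dicts):
--     keys = ["df_outcomes", "df_knowledge_redundancy", "df_knowledge_redundancy_imp",
--             "df_routines", "df_talent_investment", "df_talent_investment_imp",
--             "df_filtered_important"]
--     return {k: sorted({c for d in col_dicts for c in d.get(k, ())}) for k in keys}
-- ===== Notes on version B (the rewrite author's own statement) =====
-- stated objective: simpler
-- what changed: B traverses key-major instead of dict-major: for each of the 7 fixed keys it builds sorted of a set comprehension over col_dicts using d.get with an empty default, eliminating A's mutable per-key list-of-lists accumulator and its separate flatten/dedup/sort rebuild pass entirely.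
import Mathlib
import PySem

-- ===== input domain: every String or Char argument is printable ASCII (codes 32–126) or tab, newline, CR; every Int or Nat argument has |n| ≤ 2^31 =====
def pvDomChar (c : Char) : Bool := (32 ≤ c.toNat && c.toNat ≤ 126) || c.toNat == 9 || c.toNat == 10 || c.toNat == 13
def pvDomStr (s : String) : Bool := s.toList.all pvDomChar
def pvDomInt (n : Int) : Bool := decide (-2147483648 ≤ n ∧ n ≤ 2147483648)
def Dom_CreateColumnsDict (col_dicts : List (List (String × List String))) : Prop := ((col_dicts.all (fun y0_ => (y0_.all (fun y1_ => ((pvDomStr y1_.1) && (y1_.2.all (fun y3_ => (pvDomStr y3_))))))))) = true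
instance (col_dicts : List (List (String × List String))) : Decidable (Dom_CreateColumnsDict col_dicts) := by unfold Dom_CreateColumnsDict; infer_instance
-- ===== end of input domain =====

-- B replaces A's dict-major accumulation (per-key list-of-lists + final flatten/dedup/sort pass)
-- by a key-major pass building each sorted set directly; return value only.

-- the 7 fixed keys of the dict comprehension
def pvKeys7 : List String :=
  ["df_outcomes", "df_knowledge_redundancy", "df_knowledge_redundancy_imp",
   "df_routines", "df_talent_investment", "df_talent_investment_imp",
   "df_filtered_important"]

-- ===== PORT A =====
-- columns_dict starts as {k: sorted(set(flatten [])) = []}; each value then accumulates the appended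
-- lists, so its value type is List (List String). 'columns_dict[k].append(v)' is ported with
-- Dict.modify: on a key outside pvKeys7 Python raises KeyError — those inputs are excluded by Pre_.
def CreateColumnsDict (col_dicts : List (List (String × List String))) : List (String × List String) :=
  let columns_dict : PySem.Dict String (List (List String)) :=
    pvKeys7.foldl (fun d k => d.insert k []) PySem.Dict.empty
  let columns_dict := col_dicts.foldl (fun cd d =>
    d.foldl (fun cd kv => cd.modify kv.1 [] (fun l => l ++ [kv.2])) cd) columns_dict
  -- final loop: columns_dict[k] = sorted(set(col for sub in v for col in sub)), key order kept
  columns_dict.items.map (fun p =>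
    (p.1, PySem.List.sorted (PySem.Set.ofList p.2.flatten) (fun x => x) false))

-- ===== PORT B =====
-- {k: sorted({c for d in col_dicts for c in d.get(k, ())}) for k in keys}: key-major, no accumulator dict.
def CreateColumnsDict_alt (col_dicts : List (List (String × List String))) : List (String × List String) :=
  pvKeys7.map (fun k =>
    (k, PySem.List.sorted
          (col_dicts.foldl (fun s d => PySem.Set.update s ((PySem.Dict.mk d).getD k [])) PySem.Set.empty)
          (fun x => x) false))

-- ===== PRECONDITION & SPEC =====
-- Pre_ excludes (i) inputs with a key outside the 7 fixed keys, on which Python A raises KeyError,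
-- and (ii) inner association lists with duplicate keys, which do not represent any Python dict.
def Pre_CreateColumnsDict (col_dicts : List (List (String × List String))) : Prop :=
  (∀ d ∈ col_dicts, ∀ p ∈ d, p.1 ∈ pvKeys7) ∧ (∀ d ∈ col_dicts, (d.map Prod.fst).Nodup)
instance (col_dicts : List (List (String × List String))) : Decidable (Pre_CreateColumnsDict col_dicts) := by unfold Pre_CreateColumnsDict; infer_instance
def pvWitness_CreateColumnsDict : (List (List (String × List String))) :=
  [[("df_routines", ["b", "a", "b"])], [("df_outcomes", ["x"]), ("df_routines", ["a"])]]
def Spec_CreateColumnsDict (col_dicts : List (List (String × List String))) (out : List (String × List String)) : Prop := out = CreateColumnsDict_alt col_dicts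
instance (col_dicts : List (List (String × List String))) (out : List (String × List String)) : Decidable (Spec_CreateColumnsDict col_dicts out) := by unfold Spec_CreateColumnsDict; infer_instance

-- ===== CLAIM (what is proved, stated in full; the proofs are below) =====
def Claim_equal_CreateColumnsDict : Prop := ∀ (col_dicts : List (List (String × List String))), Dom_CreateColumnsDict col_dicts → Pre_CreateColumnsDict col_dicts → Spec_CreateColumnsDict col_dicts (CreateColumnsDict col_dicts)

-- ===== LEMMAS AND PROOFS =====

-- items of a nodup-keyed dict are its keys paired with their getD values
theorem pv_items_eq_keys_map {ν : Type} (d : PySem.Dict String ν) (v0 : ν) (h : d.keys.Nodup) :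
    d.items = d.keys.map (fun k => (k, d.getD k v0)) := by
  have : d.keys.map (fun k => (k, d.getD k v0))
      = d.items.map (fun p => (p.1, d.getD p.1 v0)) := by
    simp [PySem.Dict.keys, List.map_map, Function.comp_def]
  rw [this]
  conv_lhs => rw [show d.items = d.items.map id from (List.map_id _).symm]
  apply List.map_congr_left
  intro p hp
  have hg := PySem.Dict.getD_of_mem_items (d := d) (d0 := v0)
    (show (p.1, p.2) ∈ d.items by simpa using hp) h
  simp [hg]

-- one dict's contribution: filtered values flattened = first-match lookup (under nodup keys)
theorem pv_onedict (k : String) (d : List (String × List String))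
    (hnd : (d.map Prod.fst).Nodup) :
    ((d.filter (fun p => p.1 == k)).map Prod.snd).flatten = (PySem.Dict.mk d).getD k [] := by
  induction d with
  | nil => simp [PySem.Dict.getD_eq_get?_getD, PySem.Dict.get?]
  | cons p t ih =>
    simp only [List.map_cons, List.nodup_cons] at hnd
    rw [PySem.Dict.getD_eq_get?_getD, PySem.Dict.get?_mk_cons]
    by_cases h : p.1 = k
    · subst h
      have hfil : t.filter (fun q => q.1 == p.1) = [] := by
        rw [List.filter_eq_nil_iff]
        intro q hq hb
        apply hnd.1
        rw [List.mem_map]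
        exact ⟨q, hq, by simpa using hb⟩
      simp [hfil]
    · have := ih hnd.2
      rw [PySem.Dict.getD_eq_get?_getD] at this
      simp only [List.filter_cons, beq_iff_eq, h, if_false]
      simpa [h] using this

-- key-major fold = dedup of the dict-major filtered stream, per key
theorem pv_perkey (k : String) (cds : List (List (String × List String)))
    (hnd : ∀ d ∈ cds, (d.map Prod.fst).Nodup) :
    ∀ (s : PySem.Set String),
      PySem.Set.update s ((cds.flatten.filter (fun p => p.1 == k)).map Prod.snd).flatten
        = cds.foldl (fun s d => PySem.Set.update s ((PySem.Dict.mk d).getD k [])) s := by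
  induction cds with
  | nil => intro s; simp [PySem.Set.update]
  | cons d t ih =>
    intro s
    rw [List.flatten_cons, List.filter_append, List.map_append, List.flatten_append,
      PySem.Set.update_append, pv_onedict k d (hnd d (by simp)), List.foldl_cons]
    exact ih (fun d' hd' => hnd d' (by simp [hd'])) _

-- the initial dict's value at each of the 7 keys is []
theorem pv_init_getD (k : String) (hk : k ∈ pvKeys7) :
    (pvKeys7.foldl (fun d k => d.insert k ([] : List (List String))) PySem.Dict.empty).getD k [] = [] := by
  simp only [pvKeys7, List.mem_cons, List.not_mem_nil, or_false] at hk
  rcases hk with rfl | rfl | rfl | rfl | rfl | rfl | rfl <;> decide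

theorem pv_init_keys :
    (pvKeys7.foldl (fun d k => d.insert k ([] : List (List String))) PySem.Dict.empty).keys = pvKeys7 := by
  decide

-- ===== VERDICT (by name: the statement is the Claim_ definition above) =====
theorem CreateColumnsDict_spec : Claim_equal_CreateColumnsDict := by
  intro cds _ hpre
  obtain ⟨hkeys, hnd⟩ := hpre
  unfold Spec_CreateColumnsDict CreateColumnsDict CreateColumnsDict_alt
  dsimp only
  set init : PySem.Dict String (List (List String)) :=
    pvKeys7.foldl (fun d k => d.insert k []) PySem.Dict.empty with hinit
  -- fuse the nested fold into a fold over the flattened pair stream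
  rw [show (cds.foldl (fun cd d =>
        d.foldl (fun cd kv => cd.modify kv.1 [] (fun l => l ++ [kv.2])) cd) init)
      = cds.flatten.foldl (fun cd kv => cd.modify kv.1 [] (fun l => l ++ [kv.2])) init
    from List.foldl_flatten.symm]
  set D := cds.flatten.foldl (fun cd kv => cd.modify kv.1 [] (fun l => l ++ [kv.2])) init with hD
  -- keys of D are exactly pvKeys7 (all stream keys already present)
  have hDkeys : D.keys = pvKeys7 := by
    rw [hD, PySem.Dict.keys_foldl_modify_key (key := Prod.fst), pv_init_keys,
      PySem.Set.update_eq_append_filter]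
    have hnil : (PySem.Set.ofList (cds.flatten.map Prod.fst)).filter
        (fun y => !(PySem.Set.contains pvKeys7 y)) = [] := by
      rw [List.filter_eq_nil_iff]
      intro y hy
      have hy' : y ∈ cds.flatten.map Prod.fst := by
        simpa using (PySem.Set.mem_ofList _ _).1 hy
      simp only [List.mem_map, List.mem_flatten] at hy'
      obtain ⟨p, ⟨d, hd, hp⟩, rfl⟩ := hy'
      have hmem : p.1 ∈ pvKeys7 := hkeys d hd p hp
      simp only [Bool.not_eq_true']
      simpa [PySem.Set.contains] using hmem
    rw [hnil, List.append_nil]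
  have hDnodup : D.keys.Nodup := by rw [hDkeys]; decide
  rw [pv_items_eq_keys_map D [] hDnodup, hDkeys, List.map_map]
  apply List.map_congr_left
  intro k hk
  simp only [Function.comp_def]
  congr 1
  -- value of D at k: init value ([]) ++ the filtered stream
  have hval : D.getD k [] = ((cds.flatten.filter (fun p => p.1 == k)).map Prod.snd) := by
    rw [hD, PySem.Dict.getD_foldl_modify_append, pv_init_getD k hk]
    rfl
  rw [hval]
  have := pv_perkey k cds hnd PySem.Set.empty
  rw [← this]
  simp [PySem.Set.ofList_eq_foldl, PySem.Set.update, PySem.Set.empty]
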